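-- pv_equiv track=rewrite | github.com/sunshineDad/uplus | backend/app/services/ai_service.py | _determine_conversation_stage
-- ===== SOURCE A (Python) =====
-- from typing import Dict, List, Any, Optional
--
-- def _determine_conversation_stage(context: Dict[str, Any]) -> str:
--     """Determine what stage of requirement gathering we're in"""
--     if not context:
--         return "INITIAL_DISCOVERY"
--
--     info_count = len([k for k in context.keys() if context[k]])
--
--     if info_count < 3:
--         return "INITIAL_DISCOVERY"
--     elif info_count < 7:
--         return "REQUIREMENT_ELABORATION"
--     elif info_count < 12:
--         return "DETAIL_REFINEMENT"
--     else:
--         return "COMPLETION_VALIDATION"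
-- ===== SOURCE B (Python) =====
-- def _determine_conversation_stage(context):
--     """Determine what stage of requirement gathering we're in"""
--     # Single streaming pass: a state machine that promotes the stage at the
--     # moment the running truthy count crosses a promotion point (3, 7, 12).
--     promotions = {3: "REQUIREMENT_ELABORATION",
--                   7: "DETAIL_REFINEMENT",
--                   12: "COMPLETION_VALIDATION"}
--     stage = "INITIAL_DISCOVERY"
--     seen = 0
--     for v in context.values():
--         if v:
--             seen += 1
--             if seen in promotions:
--                 stage = promotions[seen]
--     return stage
-- ===== Notes on version B (the rewrite author's own statement) =====
-- stated objective: alternative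
-- what changed: Replaces count-then-classify (full truthy count, then an if/elif threshold ladder) with a single fused streaming pass: a state machine that carries the current stage and promotes it at the moment the running truthy count crosses a promotion point, so no classification step runs after the loop.
import Mathlib
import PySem

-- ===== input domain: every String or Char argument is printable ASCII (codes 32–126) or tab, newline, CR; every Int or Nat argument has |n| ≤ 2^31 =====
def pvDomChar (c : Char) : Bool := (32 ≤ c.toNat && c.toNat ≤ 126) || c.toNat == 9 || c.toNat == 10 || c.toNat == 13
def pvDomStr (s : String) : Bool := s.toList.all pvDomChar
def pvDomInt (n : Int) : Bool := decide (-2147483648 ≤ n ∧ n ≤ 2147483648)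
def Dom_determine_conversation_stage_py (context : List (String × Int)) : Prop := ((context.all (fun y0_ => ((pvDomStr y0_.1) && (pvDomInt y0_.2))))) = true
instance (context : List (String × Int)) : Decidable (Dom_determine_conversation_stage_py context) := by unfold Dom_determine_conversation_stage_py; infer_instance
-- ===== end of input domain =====

-- B: replaces count-then-classify with one fused streaming pass: a state machine promoting the stage when the running truthy count crosses 3/7/12 (alternative, same O(n) cost).

-- ===== PORT A =====
def determine_conversation_stage_py (context : List (String × Int)) : String :=
  if context = [] then "INITIAL_DISCOVERY"
  else
    let info_count : Nat := (context.filter (fun kv => kv.2 ≠ 0)).length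
    if info_count < 3 then "INITIAL_DISCOVERY"
    else if info_count < 7 then "REQUIREMENT_ELABORATION"
    else if info_count < 12 then "DETAIL_REFINEMENT"
    else "COMPLETION_VALIDATION"

-- ===== PORT B =====
def pvPromotions : PySem.Dict Int String :=
  PySem.Dict.ofList [(3, "REQUIREMENT_ELABORATION"),
                     (7, "DETAIL_REFINEMENT"),
                     (12, "COMPLETION_VALIDATION")]

def determine_conversation_stage_py_alt (context : List (String × Int)) : String :=
  (context.foldl
    (fun st kv =>
      if kv.2 ≠ 0 then
        let seen := st.1 + 1
        match pvPromotions.get? seen with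
        | some s => (seen, s)
        | none => (seen, st.2)
      else st)
    ((0 : Int), "INITIAL_DISCOVERY")).2

-- ===== PRECONDITION & SPEC =====
def Spec_determine_conversation_stage_py (context : List (String × Int)) (out : String) : Prop := out = determine_conversation_stage_py_alt context
instance (context : List (String × Int)) (out : String) : Decidable (Spec_determine_conversation_stage_py context out) := by unfold Spec_determine_conversation_stage_py; infer_instance

-- ===== CLAIM =====
def Claim_equal_determine_conversation_stage_py : Prop := ∀ (context : List (String × Int)), Dom_determine_conversation_stage_py context → Spec_determine_conversation_stage_py context (determine_conversation_stage_py context)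

-- ===== LEMMAS AND PROOFS =====

/-- A's if/elif ladder as a function of the truthy count (proof-side characterisation). -/
def pvClassify (n : Int) : String :=
  if n < 3 then "INITIAL_DISCOVERY"
  else if n < 7 then "REQUIREMENT_ELABORATION"
  else if n < 12 then "DETAIL_REFINEMENT"
  else "COMPLETION_VALIDATION"

lemma promote_step (c : Int) (hc : 0 ≤ c) :
    (match pvPromotions.get? (c + 1) with
     | some s => s
     | none => pvClassify c) = pvClassify (c + 1) := by
  have hmk : pvPromotions = PySem.Dict.mk [(3, "REQUIREMENT_ELABORATION"),
      (7, "DETAIL_REFINEMENT"), (12, "COMPLETION_VALIDATION")] := by decide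
  by_cases h3 : c + 1 = 3
  · have : c = 2 := by omega
    subst this; decide
  · by_cases h7 : c + 1 = 7
    · have : c = 6 := by omega
      subst this; decide
    · by_cases h12 : c + 1 = 12
      · have : c = 11 := by omega
        subst this; decide
      · have hnone : pvPromotions.get? (c + 1) = none := by
          have e3 : ((3 : Int) == c + 1) = false := by simpa using (by omega : ¬(3 : Int) = c + 1)
          have e7 : ((7 : Int) == c + 1) = false := by simpa using (by omega : ¬(7 : Int) = c + 1)
          have e12 : ((12 : Int) == c + 1) = false := by simpa using (by omega : ¬(12 : Int) = c + 1)
          simp [hmk, PySem.Dict.get?, List.find?, e3, e7, e12]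
        rw [hnone]
        unfold pvClassify
        split_ifs <;> first | rfl | omega

lemma fold_inv (l : List (String × Int)) (c : Int) (hc : 0 ≤ c) :
    l.foldl
      (fun st kv =>
        if kv.2 ≠ 0 then
          let seen := st.1 + 1
          match pvPromotions.get? seen with
          | some s => (seen, s)
          | none => (seen, st.2)
        else st)
      (c, pvClassify c)
    = (c + ((l.filter (fun kv => kv.2 ≠ 0)).length : Int),
       pvClassify (c + ((l.filter (fun kv => kv.2 ≠ 0)).length : Int))) := by
  induction l generalizing c with
  | nil => simp
  | cons h t ih =>
    rw [List.foldl_cons, List.filter_cons]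
    by_cases hv : h.2 = 0
    · rw [if_neg (by simp [hv])]
      simpa [hv] using ih c hc
    · rw [if_pos (by simp [hv])]
      have key :
          (match pvPromotions.get? (c + 1) with
           | some s => ((c + 1 : Int), s)
           | none => ((c + 1 : Int), pvClassify c))
          = ((c + 1 : Int), pvClassify (c + 1)) := by
        have hp := promote_step c hc
        cases hg : pvPromotions.get? (c + 1) with
        | some s => rw [hg] at hp; simp [hp]
        | none => rw [hg] at hp; simp [hp]
      show (t.foldl _ (match pvPromotions.get? (c + 1) with
           | some s => ((c + 1 : Int), s)
           | none => ((c + 1 : Int), pvClassify c))) = _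
      rw [key, ih (c + 1) (by omega)]
      have harith : c + 1 + ((t.filter (fun kv => kv.2 ≠ 0)).length : Int)
          = c + (((t.filter (fun kv => kv.2 ≠ 0)).length + 1 : Nat) : Int) := by
        push_cast; ring
      simp only [hv, ne_eq, not_false_eq_true, decide_true, if_pos, List.length_cons, harith]

/-- A's ladder on a Nat count equals pvClassify of its cast. -/
lemma classify_nat (n : Nat) :
    (if n < 3 then "INITIAL_DISCOVERY"
     else if n < 7 then "REQUIREMENT_ELABORATION"
     else if n < 12 then "DETAIL_REFINEMENT"
     else "COMPLETION_VALIDATION") = pvClassify (n : Int) := by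
  unfold pvClassify
  split_ifs <;> first | rfl | omega

-- ===== VERDICT =====
theorem determine_conversation_stage_py_spec : Claim_equal_determine_conversation_stage_py := by
  intro context _
  unfold Spec_determine_conversation_stage_py determine_conversation_stage_py
    determine_conversation_stage_py_alt
  rw [show "INITIAL_DISCOVERY" = pvClassify 0 from rfl, fold_inv context 0 le_rfl, zero_add]
  by_cases hc : context = []
  · subst hc; decide
  · rw [if_neg hc]
    exact classify_nat _
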